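-- pv_equiv track=rewrite | github.com/tomgxz/PokerAnalyser | main.py | onePairScore
-- ===== SOURCE A (Python) =====
-- def getCardNumericValue(card):
--     if card[0] == "A":
--          return [14,card[1]]
--     if card[0] == "J":
--          return [11,card[1]]
--     if card[0] == "Q":
--          return [12,card[1]]
--     if card[0] == "K":
--          return [13,card[1]]
--     return [int(card[0]),card[1]]
--
-- def getSortedRanks(cards):
--     cards=[getCardNumericValue(c) for c in cards]
--     cards=[x[0] for x in cards]
--     cards.sort()
--     return cards
--
-- def onePairScore(cards):
--     returnList=[]
--
--     cards=getSortedRanks(cards)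
--     cards.reverse()
--
--     for card in cards:
--         if cards.count(card) == 2:
--             returnList.append(card)
--             cards=[x for x in cards if x != card]
--
--     for card in cards:
--         returnList.append(card)
--
--     return returnList
-- ===== SOURCE B (Python) =====
-- RANK_OF = {"A": 14, "J": 11, "Q": 12, "K": 13}
--
-- def onePairScore(cards):
--     ranks = [RANK_OF[c[0]] if c[0] in RANK_OF else int(c[0]) for c in cards]
--     counts = {}
--     for r in ranks:
--         counts[r] = counts.get(r, 0) + 1
--     pairs = sorted([r for r in counts if counts[r] == 2], reverse=True)
--     rest = sorted([r for r in ranks if counts[r] != 2], reverse=True)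
--     return pairs + rest
-- ===== Notes on version B (the rewrite author's own statement) =====
-- stated objective: simpler
-- what changed: Replaces A's mutate-while-iterating scan (re-counting and rebuilding the rank list inside the loop) by a count table built in one pass plus two sorted-descending partition passes (ranks with count exactly 2 emitted once, then all occurrences of the others).
import Mathlib
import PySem

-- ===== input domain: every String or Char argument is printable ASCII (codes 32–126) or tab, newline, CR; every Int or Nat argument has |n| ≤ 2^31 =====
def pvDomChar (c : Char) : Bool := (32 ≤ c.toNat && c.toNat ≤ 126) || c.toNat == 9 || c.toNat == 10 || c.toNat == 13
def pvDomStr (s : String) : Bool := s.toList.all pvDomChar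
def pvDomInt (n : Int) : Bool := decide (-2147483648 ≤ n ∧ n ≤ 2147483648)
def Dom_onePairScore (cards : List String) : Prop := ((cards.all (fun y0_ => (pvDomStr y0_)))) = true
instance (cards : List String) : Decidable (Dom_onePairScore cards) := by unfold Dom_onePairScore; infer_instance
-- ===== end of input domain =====

-- B replaces A's delete-during-iteration scan by a count table plus two sorted-descending
-- partition passes; same return value (objective: simpler, no speed claim).

-- ===== PORT A =====
-- card[1] is an Option Char: none is exactly Python's IndexError (excluded by Pre_); the
-- '.getD 0' in the last branch is only reached outside Pre_ (int(card[0]) ValueError there).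
def getCardNumericValue (card : String) : Int × Option Char :=
  let c0 := PySem.Str.pyGet? card 0
  let c1 := PySem.Str.pyGet? card 1
  if c0 = some 'A' then (14, c1)
  else if c0 = some 'J' then (11, c1)
  else if c0 = some 'Q' then (12, c1)
  else if c0 = some 'K' then (13, c1)
  else ((c0.bind (fun ch => PySem.Int.ofChars? [ch])).getD 0, c1)

def getSortedRanks (cards : List String) : List Int :=
  let cards1 := cards.map getCardNumericValue
  let cards2 := cards1.map (fun x => x.1)
  PySem.List.sorted cards2 (fun x => x) false

def onePairScore (cards : List String) : List Int :=
  let cards1 := (getSortedRanks cards).reverse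
  -- Python's 'for card in cards' iterates the ORIGINAL reversed list even though the name
  -- 'cards' is rebound inside the loop; the rebound list is the first state component.
  let st := cards1.foldl
    (fun (st : List Int × List Int) card =>
      if PySem.List.count st.1 card = 2 then
        (st.1.filter (fun x => x != card), st.2 ++ [card])
      else st)
    (cards1, ([] : List Int))
  st.1.foldl (fun acc card => acc ++ [card]) st.2

-- ===== PORT B =====
def pvRankOf (card : String) : Int :=
  let d : PySem.Dict Char Int := PySem.Dict.ofList [('A', 14), ('J', 11), ('Q', 12), ('K', 13)]
  match PySem.Str.pyGet? card 0 with
  | some ch => if d.contains ch then d.getD ch 0 else (PySem.Int.ofChars? [ch]).getD 0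
  | none => 0  -- unreachable under Pre_ (Python IndexError on card[0])

def onePairScore_alt (cards : List String) : List Int :=
  let ranks := cards.map pvRankOf
  let counts := ranks.foldl (fun d r => d.insert r (d.getD r 0 + 1))
    (PySem.Dict.empty : PySem.Dict Int Int)
  let pairs := PySem.List.sorted ((counts.keys).filter (fun r => counts.getD r 0 == 2)) (fun x => x) true
  let rest := PySem.List.sorted (ranks.filter (fun r => counts.getD r 0 != 2)) (fun x => x) true
  pairs ++ rest

-- ===== PRECONDITION & SPEC =====
-- Pre_ excludes exactly the inputs where Python A raises: a card shorter than 2 characters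
-- (IndexError on card[0] or card[1]) or a first character that is neither A/J/Q/K nor a
-- digit (ValueError in int(card[0])).
def Pre_onePairScore (cards : List String) : Prop :=
  ∀ c ∈ cards, 2 ≤ c.toList.length ∧
    (c.toList.headD ' ' = 'A' ∨ c.toList.headD ' ' = 'J' ∨ c.toList.headD ' ' = 'Q' ∨
     c.toList.headD ' ' = 'K' ∨ ('0' ≤ c.toList.headD ' ' ∧ c.toList.headD ' ' ≤ '9'))
instance (cards : List String) : Decidable (Pre_onePairScore cards) := by
  unfold Pre_onePairScore; infer_instance

def pvWitness_onePairScore : List String := ["AS", "AD", "5H", "7C", "7D"]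

def Spec_onePairScore (cards : List String) (out : List Int) : Prop := out = onePairScore_alt cards
instance (cards : List String) (out : List Int) : Decidable (Spec_onePairScore cards out) := by
  unfold Spec_onePairScore; infer_instance

-- ===== CLAIM (what is proved, stated in full; the proofs are below) =====
def Claim_equal_onePairScore : Prop :=
  ∀ (cards : List String), Dom_onePairScore cards → Pre_onePairScore cards →
    Spec_onePairScore cards (onePairScore cards)

-- ===== LEMMAS AND PROOFS =====

-- the two rank extractors agree on every card (all branches of both ports)
lemma pvRankOf_eq (card : String) : pvRankOf card = (getCardNumericValue card).1 := by
  unfold pvRankOf getCardNumericValue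
  rw [show PySem.Dict.ofList [('A', (14:Int)), ('J', 11), ('Q', 12), ('K', 13)]
      = PySem.Dict.mk [('A', 14), ('J', 11), ('Q', 12), ('K', 13)] from rfl]
  cases h : PySem.Str.pyGet? card 0 with
  | none => simp
  | some ch =>
    simp only [PySem.Dict.getD, PySem.Dict.contains_mk, PySem.Dict.get?_mk_cons, List.any_cons,
      List.any_nil, Option.bind_some]
    by_cases hA : ch = 'A'
    · subst hA; simp
    · by_cases hJ : ch = 'J'
      · subst hJ; simp
      · by_cases hQ : ch = 'Q'
        · subst hQ; simp
        · by_cases hK : ch = 'K'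
          · subst hK; simp
          · simp [hA, hJ, hQ, hK, Ne.symm hA, Ne.symm hJ, Ne.symm hQ, Ne.symm hK, beq_iff_eq]

lemma pvFoldlAdd_sublist (xs : List Int) :
    ∀ (s pre : List Int), List.Sublist s pre →
      List.Sublist (xs.foldl PySem.Set.add s) (pre ++ xs) := by
  induction xs with
  | nil => intro s pre h; simpa using h
  | cons x xs ih =>
    intro s pre h
    have h2 : List.Sublist (PySem.Set.add s x) (pre ++ [x]) := by
      unfold PySem.Set.add
      split
      · exact h.trans (List.sublist_append_left pre [x])
      · exact h.append (List.Sublist.refl [x])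
    have := ih (PySem.Set.add s x) (pre ++ [x]) h2
    simpa [List.append_assoc] using this

-- set(xs) (first occurrences in order) is a sublist of xs
lemma pvOfList_sublist (xs : List Int) : List.Sublist (PySem.Set.ofList xs) xs := by
  rw [PySem.Set.ofList_eq_foldl]
  simpa using pvFoldlAdd_sublist xs [] [] (List.Sublist.refl [])

lemma pvCount_filter_not_mem (l0 ret : List Int) (card : Int) :
    List.count card (l0.filter (fun x => !ret.contains x))
      = if ret.contains card then 0 else List.count card l0 := by
  split
  · rename_i h
    refine List.count_eq_zero.mpr ?_
    intro hm
    have := List.of_mem_filter hm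
    simp_all
  · rename_i h
    exact List.count_filter (by simpa using h)

-- invariant of A's first loop: the rebound list is always l0 with the already-emitted pair
-- values removed, and the emitted values are the count-2 values in first-occurrence order
lemma pvLoop_inv (l0 : List Int) (p : List Int) : ∀ (ret : List Int),
    p.foldl
      (fun (st : List Int × List Int) card =>
        if List.count card st.1 = 2 then
          (st.1.filter (fun x => x != card), st.2 ++ [card])
        else st)
      (l0.filter (fun x => !ret.contains x), ret)
    = (l0.filter (fun x =>
        !(p.foldl (fun s card => if List.count card l0 = 2 then PySem.Set.add s card else s) ret).contains x),
       p.foldl (fun s card => if List.count card l0 = 2 then PySem.Set.add s card else s) ret) := by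
  induction p with
  | nil => intro ret; rfl
  | cons card p ih =>
    intro ret
    simp only [List.foldl_cons, pvCount_filter_not_mem]
    by_cases hmem : card ∈ ret
    · have hadd : PySem.Set.add ret card = ret := by
        unfold PySem.Set.add
        simp [PySem.Set.contains, hmem]
      have h0 : ¬ ((if ret.contains card = true then 0 else List.count card l0) = 2) := by
        simp [hmem]
      rw [if_neg h0]
      by_cases hc : List.count card l0 = 2
      · simp only [if_pos hc, hadd]; exact ih ret
      · simp only [if_neg hc]; exact ih ret
    · have hcnt : (if ret.contains card = true then 0 else List.count card l0) = List.count card l0 := by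
        simp [hmem]
      rw [hcnt]
      by_cases hc : List.count card l0 = 2
      · have hadd : PySem.Set.add ret card = ret ++ [card] := by
          unfold PySem.Set.add
          simp [PySem.Set.contains, hmem]
        have hfilter : (l0.filter (fun x => !ret.contains x)).filter (fun x => x != card)
            = l0.filter (fun x => !(ret ++ [card]).contains x) := by
          rw [List.filter_filter]
          apply List.filter_congr
          intro x _
          by_cases hx : x = card <;> simp [hx, bne]
        simp only [if_pos hc, hadd, hfilter]
        exact ih (ret ++ [card])
      · simp only [if_neg hc]
        exact ih ret

-- the two programs agree for ANY rank list (stated on the shared rank list)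
theorem pvMain (ranks : List Int) :
    (let l0 := (PySem.List.sorted ranks (fun x => x) false).reverse
     let st := l0.foldl
       (fun (st : List Int × List Int) card =>
         if List.count card st.1 = 2 then
           (st.1.filter (fun x => x != card), st.2 ++ [card])
         else st) (l0, ([] : List Int))
     st.1.foldl (fun acc card => acc ++ [card]) st.2)
    = (let counts := ranks.foldl (fun d r => d.insert r (d.getD r 0 + 1)) (PySem.Dict.empty : PySem.Dict Int Int)
       let pairs := PySem.List.sorted ((counts.keys).filter (fun r => counts.getD r 0 == 2)) (fun x => x) true
       let rest := PySem.List.sorted (ranks.filter (fun r => counts.getD r 0 != 2)) (fun x => x) true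
       pairs ++ rest) := by
  simp only []
  set l0 := (PySem.List.sorted ranks (fun x => x) false).reverse with hl0
  have hperm : l0.Perm ranks := (List.reverse_perm _).trans (PySem.List.sorted_perm ranks _ false)
  have hcount : ∀ x : Int, List.count x l0 = List.count x ranks := fun x => hperm.count_eq x
  have hpair : l0.Pairwise (fun a b => b ≤ a) := by
    rw [hl0, List.pairwise_reverse]
    exact PySem.List.sorted_pairwise ranks (fun x => x)
  -- predicate bridges
  have hpred : (fun r : Int => ((List.count r ranks : Int) == 2)) = (fun x => decide (List.count x l0 = 2)) := by
    funext x
    rw [← hcount x]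
    by_cases h : List.count x l0 = 2
    · simp [h]
    · simp only [h, decide_false]
      simp only [beq_eq_false_iff_ne, ne_eq]
      exact_mod_cast h
  have hpred' : (fun r : Int => ((List.count r ranks : Int) != 2)) = (fun x => !(decide (List.count x l0 = 2))) := by
    funext x
    rw [← hcount x]
    by_cases h : List.count x l0 = 2
    · simp [h]
    · simp only [h, decide_false, Bool.not_false, bne_iff_ne, ne_eq]
      exact_mod_cast h
  -- A's loop
  have hinit : (l0, ([] : List Int)) = (l0.filter (fun x => !(([]:List Int)).contains x), ([]:List Int)) := by
    simp
  rw [hinit, pvLoop_inv l0 l0 []]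
  set E := l0.foldl (fun s card => if List.count card l0 = 2 then PySem.Set.add s card else s) [] with hEdef
  have hE : E = PySem.Set.ofList (l0.filter (fun x => decide (List.count x l0 = 2))) := by
    rw [hEdef, PySem.List.foldl_ite_eq_foldl_filter (p := fun card => List.count card l0 = 2)
      (f := PySem.Set.add), ← PySem.Set.ofList_eq_foldl]
  have hnodupE : E.Nodup := by rw [hE]; exact PySem.Set.nodup_ofList _
  have memE : ∀ x : Int, x ∈ E ↔ (x ∈ l0 ∧ List.count x l0 = 2) := by
    intro x
    rw [hE, PySem.Set.mem_ofList, List.mem_filter]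
    simp
  rw [PySem.List.foldl_append_singleton_eq_self]
  -- pairs
  have hpairs : PySem.List.sorted ((PySem.Set.ofList ranks).filter (fun r => ((List.count r ranks : Int) == 2))) (fun x => x) true = E := by
    apply PySem.List.sorted_rev_eq_of_perm_of_pairwise_gt
    · rw [List.perm_ext_iff_of_nodup hnodupE ((PySem.Set.nodup_ofList ranks).filter _)]
      intro a
      rw [memE, List.mem_filter, PySem.Set.mem_ofList, hperm.mem_iff, ← hcount a]
      simp only [beq_iff_eq, and_congr_right_iff]
      intro _
      constructor
      · intro h; exact_mod_cast h
      · intro h; exact_mod_cast h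
    · have hsub : List.Sublist E l0 := by
        rw [hE]
        exact (pvOfList_sublist _).trans List.filter_sublist
      exact ((hpair.sublist hsub).and hnodupE).imp (fun h => lt_of_le_of_ne h.1 (Ne.symm h.2))
  -- rest
  have hrest : PySem.List.sorted (ranks.filter (fun r => ((List.count r ranks : Int) != 2))) (fun x => x) true
      = l0.filter (fun x => !(decide (List.count x l0 = 2))) := by
    apply PySem.List.eq_of_perm_of_pairwise_le_of_injective (fun x : Int => -x) neg_injective
    · refine (PySem.List.sorted_perm _ _ _).trans ?_
      rw [hpred']
      exact (hperm.filter _).symm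
    · exact (PySem.List.sorted_pairwise_rev _ _).imp (fun h => neg_le_neg h)
    · exact (hpair.filter _).imp (fun h => neg_le_neg h)
  -- final: filter congruence on the remaining-list component
  have hcur : l0.filter (fun x => !E.contains x) = l0.filter (fun x => !(decide (List.count x l0 = 2))) := by
    apply List.filter_congr
    intro x hx
    have : E.contains x = decide (List.count x l0 = 2) := by
      by_cases h : List.count x l0 = 2
      · simp [h]
        exact (memE x).mpr ⟨hx, h⟩
      · simp [h]
        intro hmE
        exact h ((memE x).mp (by simpa using hmE)).2
    rw [this]
  rw [show (ranks.foldl (fun d r => d.insert r (d.getD r 0 + 1)) (PySem.Dict.empty : PySem.Dict Int Int)) = PySem.Dict.counter ranks from PySem.Dict.foldl_insert_getD_add_one_eq_counter ranks]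
  simp only [PySem.Dict.keys_counter, PySem.Dict.getD_counter]
  rw [hpairs, hrest, hcur]

-- ===== VERDICT (by name: the statement is the Claim_ definition above) =====
theorem onePairScore_spec : Claim_equal_onePairScore := by
  intro cards _ _
  unfold Spec_onePairScore onePairScore onePairScore_alt getSortedRanks
  simp only [PySem.List.count_eq, List.map_map, Function.comp_def]
  rw [show (cards.map (fun x => (getCardNumericValue x).1)) = cards.map pvRankOf from by
    simp only [← pvRankOf_eq]]
  have h := pvMain (cards.map pvRankOf)
  simp only [] at h
  exact h
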